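-- pv_equiv track=rewrite | github.com/vineetred/aesDES | test.py | byte2array
-- ===== SOURCE A (Python) =====
-- def byte2array(bytes):
--     """Converts bytes to 4 x 4 array
--     :param bytes: bytes
--     :return: 4 x 4 array
--     """
--     array = []
--     for i, byte in enumerate(bytes):
--         if i % 4 == 0:
--             array.append([byte])
--         else:
--             array[i // 4].append(byte)
--     return array
-- ===== SOURCE B (Python) =====
-- def byte2array(bytes):
--     """Converts bytes to 4 x 4 array by slicing out one 4-byte row per stride-4 offset."""
--     return [list(bytes[i:i + 4]) for i in range(0, len(bytes), 4)]
-- ===== Notes on version B (the rewrite author's own statement) =====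
-- stated objective: simpler
-- what changed: Replaces the per-byte enumerate loop with its i%4/i//4 counter bookkeeping and in-place row mutation by a one-line stride-4 slice comprehension that builds each 4-byte row directly.
import Mathlib
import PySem

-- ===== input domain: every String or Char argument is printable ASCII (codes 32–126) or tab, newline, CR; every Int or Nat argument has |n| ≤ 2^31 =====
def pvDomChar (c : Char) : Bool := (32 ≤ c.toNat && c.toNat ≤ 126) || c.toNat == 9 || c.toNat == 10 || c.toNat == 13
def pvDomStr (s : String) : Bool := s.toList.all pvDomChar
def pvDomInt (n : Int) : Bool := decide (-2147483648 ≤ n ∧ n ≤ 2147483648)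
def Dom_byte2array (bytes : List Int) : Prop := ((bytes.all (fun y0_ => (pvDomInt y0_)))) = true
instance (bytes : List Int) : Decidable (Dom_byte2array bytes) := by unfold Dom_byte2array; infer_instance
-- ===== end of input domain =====

-- B is simpler: a stride-4 slice comprehension replaces A's per-byte enumerate loop with its i%4 / i//4 counter bookkeeping and in-place row mutation.

-- ===== PORT A =====
-- for-loop over enumerate(bytes) as a foldl over PySem.List.enumerate;
-- array[i//4].append(byte) becomes List.modify at index (i//4) (always in range here)
def byte2array (bytes : List Int) : List (List Int) :=
  (PySem.List.enumerate bytes).foldl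
    (fun array p =>
      if PySem.Int.mod p.1 4 == 0 then array ++ [[p.2]]
      else array.modify (PySem.Int.floordiv p.1 4).toNat (· ++ [p.2]))
    []

-- ===== PORT B =====
-- [list(bytes[i:i+4]) for i in range(0, len(bytes), 4)]
def byte2array_alt (bytes : List Int) : List (List Int) :=
  (PySem.List.pyRange 0 (bytes.length : Int) 4).map
    (fun i => PySem.List.slice bytes (some i) (some (i + 4)))

-- ===== PRECONDITION & SPEC =====
def Spec_byte2array (bytes : List Int) (out : List (List Int)) : Prop := out = byte2array_alt bytes
instance (bytes : List Int) (out : List (List Int)) : Decidable (Spec_byte2array bytes out) := by unfold Spec_byte2array; infer_instance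

-- ===== CLAIM (what is proved, stated in full; the proofs are below) =====
def Claim_equal_byte2array : Prop := ∀ (bytes : List Int), Dom_byte2array bytes → Spec_byte2array bytes (byte2array bytes)

-- ===== LEMMAS AND PROOFS =====

-- proof-only reference shape: the list of 4-element chunks
def pvChunks (bytes : List Int) : List (List Int) :=
  match bytes with
  | [] => []
  | x :: t => ((x :: t).take 4) :: pvChunks ((x :: t).drop 4)
termination_by bytes.length
decreasing_by simp

-- how the chunk list extends when one more byte is appended: exactly A's two branches
theorem pvChunks_snoc (pre : List Int) (b : Int) :
    pvChunks (pre ++ [b]) =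
      if pre.length % 4 = 0 then pvChunks pre ++ [[b]]
      else (pvChunks pre).modify (pre.length / 4) (· ++ [b]) := by
  match pre with
  | [] => simp [pvChunks]
  | x :: t =>
    rw [List.cons_append, pvChunks, pvChunks]
    by_cases h4 : t.length + 1 < 4
    · -- whole input fits in the (single) current row
      have hdrop : (x :: t).drop 4 = [] := by
        apply List.drop_eq_nil_of_le; simpa using Nat.le_of_lt h4
      have hdrop' : (x :: (t ++ [b])).drop 4 = [] := by
        apply List.drop_eq_nil_of_le; simp; omega
      have htake : (x :: t).take 4 = x :: t := by
        apply List.take_of_length_le; simpa using Nat.le_of_lt h4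
      have htake' : (x :: (t ++ [b])).take 4 = x :: (t ++ [b]) := by
        apply List.take_of_length_le; simp; omega
      have hm : ¬ (x :: t).length % 4 = 0 := by simp; omega
      have hd : (x :: t).length / 4 = 0 := by simp; omega
      rw [if_neg hm, hd, htake', hdrop', htake, hdrop]
      simp [pvChunks, List.modify]
    · -- length ≥ 4: peel the first full row off and recurse
      have h4' : 4 ≤ (x :: t).length := by simp; omega
      have htake' : (x :: (t ++ [b])).take 4 = (x :: t).take 4 := by
        rw [← List.cons_append, List.take_append_of_le_length h4']
      have hdrop' : (x :: (t ++ [b])).drop 4 = (x :: t).drop 4 ++ [b] := by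
        rw [← List.cons_append, List.drop_append_of_le_length h4']
      have hlen : ((x :: t).drop 4).length = (x :: t).length - 4 := by simp
      have ih := pvChunks_snoc ((x :: t).drop 4) b
      rw [htake', hdrop', ih, hlen]
      by_cases hm : (x :: t).length % 4 = 0
      · rw [if_pos (by omega : ((x :: t).length - 4) % 4 = 0), if_pos hm]
        simp
      · rw [if_neg (by omega : ¬ ((x :: t).length - 4) % 4 = 0), if_neg hm]
        have hq : (x :: t).length / 4 = ((x :: t).length - 4) / 4 + 1 := by
          omega
        rw [hq]
        simp [List.modify]
termination_by pre.length
decreasing_by simp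

-- A's loop invariant: after processing prefix `pre`, the accumulator is pvChunks pre
theorem pvFold_chunks (l pre : List Int) :
    (PySem.List.enumerate l (pre.length : Int)).foldl
      (fun array p =>
        if PySem.Int.mod p.1 4 == 0 then array ++ [[p.2]]
        else array.modify (PySem.Int.floordiv p.1 4).toNat (· ++ [p.2]))
      (pvChunks pre)
    = pvChunks (pre ++ l) := by
  induction l generalizing pre with
  | nil => simp
  | cons b t ih =>
    rw [PySem.List.enumerate_cons, List.foldl_cons]
    have hmod : PySem.Int.mod ((pre.length : Nat) : Int) 4 = ((pre.length % 4 : Nat) : Int) := by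
      rw [PySem.Int.mod_eq_emod_of_pos (by norm_num)]; omega
    have hdiv : (PySem.Int.floordiv ((pre.length : Nat) : Int) 4).toNat = pre.length / 4 := by
      rw [PySem.Int.floordiv_eq_ediv_of_pos (by norm_num)]; omega
    have hstep :
        (if PySem.Int.mod ((pre.length : Int)) 4 == 0
         then pvChunks pre ++ [[b]]
         else (pvChunks pre).modify
                (PySem.Int.floordiv ((pre.length : Int)) 4).toNat (· ++ [b]))
        = pvChunks (pre ++ [b]) := by
      rw [pvChunks_snoc, hmod, hdiv]
      by_cases hm : pre.length % 4 = 0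
      · rw [if_pos hm, if_pos (by simp [hm])]
      · rw [if_neg hm, if_neg (by simp; omega)]
    rw [hstep]
    have hlen : (pre.length : Int) + 1 = (((pre ++ [b]).length : Nat) : Int) := by
      simp
    rw [hlen, ih (pre ++ [b]), List.append_assoc]
    rfl

-- Nat-world form of B's comprehension body
theorem pvMapRange_chunks (l : List Int) :
    (List.range ((l.length + 3) / 4)).map (fun k => (l.drop (4 * k)).take 4)
      = pvChunks l := by
  match l with
  | [] => simp [pvChunks]
  | x :: t =>
    have hN : ((x :: t).length + 3) / 4 = (((x :: t).drop 4).length + 3) / 4 + 1 := by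
      simp; omega
    rw [hN, List.range_succ_eq_map, List.map_cons, List.map_map, pvChunks]
    have ih := pvMapRange_chunks ((x :: t).drop 4)
    refine congrArg₂ _ (by simp) ?_
    rw [← ih]
    refine List.map_congr_left (fun k _ => ?_)
    simp [Function.comp, List.drop_drop]
    have h : 4 * (k + 1) = 3 + 4 * k + 1 := by ring
    rw [h, List.drop_succ_cons]
termination_by l.length
decreasing_by simp

-- B's port equals the chunk list
theorem pvAlt_eq_chunks (l : List Int) : byte2array_alt l = pvChunks l := by
  rw [byte2array_alt,
      PySem.List.pyRange_of_pos 0 (l.length : Int) (by norm_num), List.map_map]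
  have hN : (if (0:Int) < (l.length : Int)
              then (((l.length : Int) - 0 + 4 - 1) / 4).toNat else 0)
            = (l.length + 3) / 4 := by
    by_cases h : (0:Int) < (l.length : Int)
    · rw [if_pos h]; omega
    · rw [if_neg h]; omega
  rw [hN, ← pvMapRange_chunks l]
  refine List.map_congr_left (fun k _ => ?_)
  show PySem.List.slice l (some (0 + 4 * (k : Int))) (some (0 + 4 * (k : Int) + 4)) = _
  have h1 : (0 + 4 * (k : Int)) = ((4 * k : Nat) : Int) := by push_cast; ring
  have h2 : ((4 * k : Nat) : Int) + 4 = ((4 * k : Nat) : Int) + ((4 : Nat) : Int) := by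
    norm_num
  rw [h1, h2, PySem.List.slice_natCast_add]

-- ===== VERDICT (by name: the statement is the Claim_ definition above) =====
theorem byte2array_spec : Claim_equal_byte2array := by
  intro bytes _
  show byte2array bytes = byte2array_alt bytes
  have h := pvFold_chunks bytes []
  rw [pvAlt_eq_chunks]
  simpa [byte2array, pvChunks] using h
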